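-- pv_equiv track=rewrite | github.com/LongPham7/hybrid_aara_artifact | benchmark_suite/linear_select/utility/cost_evaluation.py | find_minimum_acc
-- ===== SOURCE A (Python) =====
-- def find_minimum_acc(acc, candidate, input_list):
--     if len(input_list) == 0:
--         return candidate, acc
--     else:
--         head_element = input_list[0]
--         if head_element < candidate:
--             return find_minimum_acc([candidate] + acc, head_element, input_list[1:])
--         else:
--             return find_minimum_acc([head_element] + acc, candidate, input_list[1:])
-- ===== SOURCE B (Python) =====
-- def find_minimum_acc(acc, candidate, input_list):
--     m = candidate
--     losers = []
--     for x in input_list: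
--         if x < m:
--             losers.append(m)
--             m = x
--         else:
--             losers.append(x)
--     losers.reverse()
--     return m, losers + acc
-- ===== Notes on version B (the rewrite author's own statement) =====
-- stated objective: faster
-- what changed: Replaces the recursion that prepends each displaced element to the accumulator ([x] + acc, O(n) per step) by a single iterative pass that appends losers to a local list and reverses it once at the end.
import Mathlib
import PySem

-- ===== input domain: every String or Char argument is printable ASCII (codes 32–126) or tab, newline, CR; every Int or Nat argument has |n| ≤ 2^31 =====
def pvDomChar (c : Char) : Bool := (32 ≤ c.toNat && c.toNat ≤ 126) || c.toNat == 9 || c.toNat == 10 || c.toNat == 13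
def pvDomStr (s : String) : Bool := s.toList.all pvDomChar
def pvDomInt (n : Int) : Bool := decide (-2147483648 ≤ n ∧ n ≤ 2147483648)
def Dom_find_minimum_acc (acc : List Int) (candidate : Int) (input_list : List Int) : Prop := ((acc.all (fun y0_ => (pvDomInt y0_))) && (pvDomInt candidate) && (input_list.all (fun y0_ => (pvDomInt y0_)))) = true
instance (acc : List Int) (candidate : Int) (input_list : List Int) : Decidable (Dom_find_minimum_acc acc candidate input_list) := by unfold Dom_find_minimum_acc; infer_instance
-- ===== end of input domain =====

-- B replaces A's recursion (which prepends to the accumulator each step, O(n^2))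
-- by one linear pass appending losers and reversing once; faster (asymptotic).

-- ===== PORT A =====
def find_minimum_acc (acc : List Int) (candidate : Int) (input_list : List Int) : Int × List Int :=
  match input_list with
  | [] => (candidate, acc)
  | head_element :: rest =>
      if head_element < candidate then
        find_minimum_acc (candidate :: acc) head_element rest
      else
        find_minimum_acc (head_element :: acc) candidate rest

-- ===== PORT B =====
-- one step of B's loop: update the running minimum, append the loser at the end
def fmaStep (st : Int × List Int) (x : Int) : Int × List Int :=
  if x < st.1 then (x, st.2 ++ [st.1]) else (st.1, st.2 ++ [x])

def find_minimum_acc_alt (acc : List Int) (candidate : Int) (input_list : List Int) : Int × List Int :=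
  let st := input_list.foldl fmaStep (candidate, [])
  (st.1, st.2.reverse ++ acc)

-- ===== PRECONDITION & SPEC =====
def Spec_find_minimum_acc (acc : List Int) (candidate : Int) (input_list : List Int) (out : Int × List Int) : Prop := out = find_minimum_acc_alt acc candidate input_list
instance (acc : List Int) (candidate : Int) (input_list : List Int) (out : Int × List Int) : Decidable (Spec_find_minimum_acc acc candidate input_list out) := by unfold Spec_find_minimum_acc; infer_instance

-- ===== CLAIM (what is proved, stated in full; the proofs are below) =====
def Claim_equal_find_minimum_acc : Prop := ∀ (acc : List Int) (candidate : Int) (input_list : List Int), Dom_find_minimum_acc acc candidate input_list → Spec_find_minimum_acc acc candidate input_list (find_minimum_acc acc candidate input_list)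

-- ===== LEMMAS AND PROOFS =====

-- the loser list produced by the fold starting from ls is ls ++ (the one starting from [])
theorem fma_foldl_acc (t : List Int) : ∀ (m : Int) (ls : List Int),
    t.foldl fmaStep (m, ls) = ((t.foldl fmaStep (m, [])).1, ls ++ (t.foldl fmaStep (m, [])).2) := by
  induction t with
  | nil => intro m ls; simp
  | cons h t ih =>
      intro m ls
      simp only [List.foldl, fmaStep, List.nil_append]
      by_cases hc : h < m
      · rw [if_pos hc, if_pos hc, ih h (ls ++ [m]), ih h [m]]
        simp
      · rw [if_neg hc, if_neg hc, ih m (ls ++ [h]), ih m [h]]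
        simp

theorem fma_main (t : List Int) : ∀ (c : Int) (acc : List Int),
    find_minimum_acc acc c t
      = ((t.foldl fmaStep (c, [])).1, (t.foldl fmaStep (c, [])).2.reverse ++ acc) := by
  induction t with
  | nil => intro c acc; simp [find_minimum_acc]
  | cons h t ih =>
      intro c acc
      simp only [find_minimum_acc, List.foldl, fmaStep, List.nil_append]
      by_cases hc : h < c
      · rw [if_pos hc, if_pos hc, ih h (c :: acc), fma_foldl_acc t h [c]]
        simp
      · rw [if_neg hc, if_neg hc, ih c (h :: acc), fma_foldl_acc t c [h]]
        simp

-- ===== VERDICT (by name: the statement is the Claim_ definition above) =====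
theorem find_minimum_acc_spec : Claim_equal_find_minimum_acc := by
  intro acc candidate input_list _
  unfold Spec_find_minimum_acc find_minimum_acc_alt
  exact fma_main input_list candidate acc
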